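-- pv_equiv track=rewrite | github.com/Tekka90/KlereoHACS | switch.py | _plan_active_periods
-- ===== SOURCE A (Python) =====
-- def _plan_active_periods(slots: list[bool]) -> list[str]:
--     """Convert 96 boolean time-slots to a list of 'HH:MM-HH:MM' active period strings."""
--     periods: list[str] = []
--     in_period = False
--     start = 0
--     for i, active in enumerate(slots):
--         if active and not in_period:
--             start = i
--             in_period = True
--         elif not active and in_period:
--             periods.append(_format_slot_range(start, i))
--             in_period = False
--     if in_period:
--         periods.append(_format_slot_range(start, len(slots)))
--     return periods
--
-- def _format_slot_range(start_slot: int, end_slot: int) -> str: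
--     """Format a half-open slot range [start, end) as 'HH:MM-HH:MM'."""
--     s = start_slot * 15
--     e = end_slot * 15
--     return f"{s // 60:02d}:{s % 60:02d}-{e // 60:02d}:{e % 60:02d}"
-- ===== SOURCE B (Python) =====
-- def _plan_active_periods(slots: list[bool]) -> list[str]:
--     """Convert boolean time-slots to 'HH:MM-HH:MM' active period strings.
--
--     Run-based decomposition: split the list into maximal runs of equal
--     values and emit one range per True run; no in_period flag, no flush.
--     """
--     periods: list[str] = []
--     n = len(slots)
--     pos = 0
--     while pos < n:
--         j = pos + 1
--         while j < n and slots[j] == slots[pos]: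
--             j += 1
--         if slots[pos]:
--             periods.append(_format_slot_range(pos, j))
--         pos = j
--     return periods
--
-- def _format_slot_range(start_slot: int, end_slot: int) -> str:
--     s = start_slot * 15
--     e = end_slot * 15
--     return f"{s // 60:02d}:{s % 60:02d}-{e // 60:02d}:{e % 60:02d}"
-- ===== Notes on version B (the rewrite author's own statement) =====
-- stated objective: alternative
-- what changed: Replaced the stateful in_period/start flag scan with trailing flush by a run-splitting scan: advance over each maximal run of equal slots and emit one range per True run directly.
import Mathlib
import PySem

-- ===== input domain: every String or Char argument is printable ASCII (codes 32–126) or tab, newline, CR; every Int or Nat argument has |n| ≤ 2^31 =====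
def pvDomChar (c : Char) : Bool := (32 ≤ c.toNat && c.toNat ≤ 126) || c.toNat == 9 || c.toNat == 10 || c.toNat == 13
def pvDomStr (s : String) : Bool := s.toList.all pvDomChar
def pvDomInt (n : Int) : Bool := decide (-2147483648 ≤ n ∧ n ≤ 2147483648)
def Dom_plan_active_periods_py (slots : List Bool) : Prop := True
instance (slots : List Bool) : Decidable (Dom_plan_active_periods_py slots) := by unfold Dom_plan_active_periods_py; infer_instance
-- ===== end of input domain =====

-- B replaces A's stateful in_period/start flag scan by a run-splitting scan
-- that emits one range per maximal True run (alternative decomposition, same cost).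


-- ===== PORT A =====
-- f"{x:02d}": zero-pad to width 2 (exact for every Int: only 0..9 gain a pad digit)
def pvFmtPadA (x : Int) : String :=
  if 0 ≤ x ∧ x < 10 then "0" ++ PySem.Int.toStr x else PySem.Int.toStr x

def format_slot_range_py (start_slot end_slot : Int) : String :=
  let s := start_slot * 15
  let e := end_slot * 15
  pvFmtPadA (PySem.Int.floordiv s 60) ++ ":" ++ pvFmtPadA (PySem.Int.mod s 60) ++ "-" ++
    pvFmtPadA (PySem.Int.floordiv e 60) ++ ":" ++ pvFmtPadA (PySem.Int.mod e 60)

-- the for-loop of A: state (periods, in_period, start), i the enumerate index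
def pvAGo (periods : List String) (inp : Bool) (start i : Nat) : List Bool → List String × Bool × Nat
  | [] => (periods, inp, start)
  | a :: t =>
    if a && !inp then pvAGo periods true i (i + 1) t
    else if !a && inp then pvAGo (periods ++ [format_slot_range_py ↑start ↑i]) false start (i + 1) t
    else pvAGo periods inp start (i + 1) t

def plan_active_periods_py (slots : List Bool) : List String :=
  let r := pvAGo [] false 0 0 slots
  if r.2.1 then r.1 ++ [format_slot_range_py ↑r.2.2 ↑slots.length] else r.1

-- ===== PORT B =====
def pvPad2 (n : Nat) : String :=
  if n < 10 then "0" ++ PySem.Int.toStr ↑n else PySem.Int.toStr ↑n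

def pvFmtRun (s e : Nat) : String :=
  pvPad2 (s * 15 / 60) ++ ":" ++ pvPad2 (s * 15 % 60) ++ "-" ++
    pvPad2 (e * 15 / 60) ++ ":" ++ pvPad2 (e * 15 % 60)

-- the outer while-loop of B: split off the maximal run starting at pos
def pvBGo (pos : Nat) (l : List Bool) : List String :=
  match l with
  | [] => []
  | b :: t =>
    let k := (t.takeWhile (· == b)).length + 1
    let rest := pvBGo (pos + k) (t.dropWhile (· == b))
    if b then pvFmtRun pos (pos + k) :: rest else rest
termination_by l.length
decreasing_by simpa using Nat.lt_succ_of_le (t.length_dropWhile_le _)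

def plan_active_periods_py_alt (slots : List Bool) : List String := pvBGo 0 slots

-- ===== PRECONDITION & SPEC =====
def Spec_plan_active_periods_py (slots : List Bool) (out : List String) : Prop := out = plan_active_periods_py_alt slots
instance (slots : List Bool) (out : List String) : Decidable (Spec_plan_active_periods_py slots out) := by unfold Spec_plan_active_periods_py; infer_instance

-- ===== CLAIM (what is proved, stated in full; the proofs are below) =====
def Claim_equal_plan_active_periods_py : Prop := ∀ (slots : List Bool), Dom_plan_active_periods_py slots → Spec_plan_active_periods_py slots (plan_active_periods_py slots)

-- ===== LEMMAS AND PROOFS =====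

lemma fmt_eq (s e : Nat) : format_slot_range_py ↑s ↑e = pvFmtRun s e := by
  have hs : ((s : Int) * 15) = ((s * 15 : Nat) : Int) := by push_cast; ring
  have he : ((e : Int) * 15) = ((e * 15 : Nat) : Int) := by push_cast; ring
  have hd : ∀ n : Nat, PySem.Int.floordiv ((n * 15 : Nat) : Int) 60 = ((n * 15 / 60 : Nat) : Int) := by
    intro n; exact_mod_cast PySem.Int.floordiv_natCast (n * 15) 60
  have hm : ∀ n : Nat, PySem.Int.mod ((n * 15 : Nat) : Int) 60 = ((n * 15 % 60 : Nat) : Int) := by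
    intro n; exact_mod_cast PySem.Int.mod_natCast (n * 15) 60
  have hc : ∀ n : Nat, ((0 : Int) ≤ (n : Int) ∧ (n : Int) < 10) ↔ n < 10 := by
    intro n; omega
  simp only [format_slot_range_py, pvFmtRun, hs, he, hd, hm, pvFmtPadA, pvPad2, hc]

lemma pvBGo_cons (i : Nat) (b : Bool) (t : List Bool) :
    pvBGo i (b :: t) =
      (if b then pvFmtRun i (i + ((t.takeWhile (· == b)).length + 1)) ::
          pvBGo (i + ((t.takeWhile (· == b)).length + 1)) (t.dropWhile (· == b))
        else pvBGo (i + ((t.takeWhile (· == b)).length + 1)) (t.dropWhile (· == b))) := by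
  rw [pvBGo]

lemma pvBGo_false (t : List Bool) (i : Nat) : pvBGo i (false :: t) = pvBGo (i + 1) t := by
  cases t with
  | nil => rw [pvBGo_cons]; simp [pvBGo]
  | cons c t' =>
    cases c with
    | false =>
      rw [pvBGo_cons, pvBGo_cons]
      simp [List.takeWhile, List.dropWhile, Nat.add_assoc, Nat.add_comm 1]
    | true =>
      rw [pvBGo_cons]
      simp [List.takeWhile, List.dropWhile]

-- A in-period with start s at index i, seen from B's run view
def pvBGoIn (s i : Nat) (t : List Bool) : List String :=
  pvFmtRun s (i + (t.takeWhile (· == true)).length) ::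
    pvBGo (i + (t.takeWhile (· == true)).length) (t.dropWhile (· == true))

def pvFinishA (n : Nat) (r : List String × Bool × Nat) : List String :=
  if r.2.1 then r.1 ++ [format_slot_range_py ↑r.2.2 ↑n] else r.1

lemma pvMain : ∀ (t : List Bool) (P : List String) (s i : Nat) (inp : Bool),
    pvFinishA (i + t.length) (pvAGo P inp s i t) =
      P ++ (if inp then pvBGoIn s i t else pvBGo i t) := by
  intro t
  induction t with
  | nil =>
    intro P s i inp
    cases inp <;> simp [pvAGo, pvFinishA, pvBGoIn, pvBGo, fmt_eq]
  | cons a t' ih =>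
    intro P s i inp
    have hlen : i + (a :: t').length = (i + 1) + t'.length := by simp; omega
    cases inp with
    | false =>
      cases a with
      | true =>
        rw [show pvAGo P false s i (true :: t') = pvAGo P true i (i + 1) t' from by
          simp [pvAGo]]
        rw [hlen, ih]
        rw [pvBGo_cons]
        simp [pvBGoIn, Nat.add_assoc, Nat.add_comm 1]
      | false =>
        rw [show pvAGo P false s i (false :: t') = pvAGo P false s (i + 1) t' from by
          simp [pvAGo]]
        rw [hlen, ih]
        simp [pvBGo_false]
    | true =>
      cases a with
      | true =>
        rw [show pvAGo P true s i (true :: t') = pvAGo P true s (i + 1) t' from by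
          simp [pvAGo]]
        rw [hlen, ih]
        simp [pvBGoIn, List.takeWhile, Nat.add_assoc, Nat.add_comm 1]
      | false =>
        rw [show pvAGo P true s i (false :: t') =
            pvAGo (P ++ [format_slot_range_py ↑s ↑i]) false s (i + 1) t' from by
          simp [pvAGo]]
        rw [hlen, ih]
        simp [pvBGoIn, List.takeWhile, List.dropWhile, pvBGo_false, fmt_eq]

-- ===== VERDICT (by name: the statement is the Claim_ definition above) =====
theorem plan_active_periods_py_spec : Claim_equal_plan_active_periods_py := by
  intro slots _
  unfold Spec_plan_active_periods_py plan_active_periods_py plan_active_periods_py_alt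
  have h := pvMain slots [] 0 0 false
  simpa [pvFinishA] using h
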